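-- pv_equiv track=rewrite | github.com/xiaojingxx/service-deck-builder | app.py | split_slides_by_line_count
-- ===== SOURCE A (Python) =====
-- def split_slides_by_line_count(text: str, lines_per_slide: int = 4) -> list[list[str]]:
--     if lines_per_slide < 1:
--         lines_per_slide = 1
--
--     verses = []
--     current_verse = []
--
--     for raw_line in text.splitlines():
--         line = raw_line.strip()
--         if line == "":
--             if current_verse:
--                 verses.append(current_verse)
--                 current_verse = []
--         else:
--             current_verse.append(line)
--
--     if current_verse:
--         verses.append(current_verse)
--
--     slides = []
--     for verse in verses:
--         for i in range(0, len(verse), lines_per_slide):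
--             chunk = verse[i:i + lines_per_slide]
--             if chunk:
--                 slides.append(chunk)
--
--     return slides
-- ===== SOURCE B (Python) =====
-- def split_slides_by_line_count(text: str, lines_per_slide: int = 4) -> list[list[str]]:
--     k = lines_per_slide if lines_per_slide >= 1 else 1
--     lines = [raw.strip() for raw in text.splitlines()]
--     n = len(lines)
--     slides = []
--     i = 0
--     while i < n:
--         line = lines[i]
--         i += 1
--         if line == "":
--             continue
--         chunk = [line]
--         while i < n and lines[i] != "" and len(chunk) < k:
--             chunk.append(lines[i])
--             i += 1
--         slides.append(chunk)
--     return slides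
-- ===== Notes on version B (the rewrite author's own statement) =====
-- stated objective: alternative
-- what changed: Replaces A's two-phase structure (a fold that builds a list of verses, then a range/slice loop chunking each verse) with a single index-driven scan over the pre-stripped lines: an outer while over the line index that skips blanks and an inner while that collects up to k consecutive non-blank lines per slide, so no intermediate verse list or slicing is needed.
import Mathlib
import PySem

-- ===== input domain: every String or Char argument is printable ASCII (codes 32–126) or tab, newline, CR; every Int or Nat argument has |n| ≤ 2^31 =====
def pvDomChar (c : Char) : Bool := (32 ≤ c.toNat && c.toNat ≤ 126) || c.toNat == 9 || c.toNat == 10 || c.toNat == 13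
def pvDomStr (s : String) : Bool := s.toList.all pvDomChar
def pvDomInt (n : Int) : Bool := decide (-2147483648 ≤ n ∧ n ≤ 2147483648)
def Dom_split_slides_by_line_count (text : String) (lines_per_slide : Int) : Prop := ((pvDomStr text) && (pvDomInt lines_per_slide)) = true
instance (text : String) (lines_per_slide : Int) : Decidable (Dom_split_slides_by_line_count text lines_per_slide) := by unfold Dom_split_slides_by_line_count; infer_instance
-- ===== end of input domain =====

-- B replaces A's two-phase structure (build a verse list with a fold, then chunk each verse by
-- range/slice) with a single index-driven scan: strip all lines once, then an outer while over the
-- line index that skips blanks and an inner while that collects up to k non-blank lines per slide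
-- (objective: alternative decomposition, same O(n) cost).


-- ===== PORT A =====
def split_slides_by_line_count (text : String) (lines_per_slide : Int) : List (List String) :=
  let k := if lines_per_slide < 1 then 1 else lines_per_slide
  let st := (PySem.Str.splitlines text).foldl
    (fun (st : List (List String) × List String) raw_line =>
      let line := PySem.Str.strip raw_line
      if line = "" then
        (if st.2 ≠ [] then (st.1 ++ [st.2], []) else st)
      else
        (st.1, st.2 ++ [line])) ([], [])
  let verses := if st.2 ≠ [] then st.1 ++ [st.2] else st.1
  verses.foldl (fun slides verse =>
    (PySem.List.pyRange 0 (PySem.List.len verse) k).foldl (fun acc i =>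
      let chunk := PySem.List.slice verse (some i) (some (i + k))
      if chunk ≠ [] then acc ++ [chunk] else acc) slides) []

-- ===== PORT B =====
-- inner while: 'while i < n and lines[i] != "" and len(chunk) < k: chunk.append(lines[i]); i += 1'
def pvInnerB (lines : List String) (n k : Nat) (i : Nat) (chunk : List String) : Nat × List String :=
  if _h : i < n ∧ (PySem.List.pyGet? lines (i : Int)).getD "" ≠ "" ∧ chunk.length < k then
    pvInnerB lines n k (i + 1) (chunk ++ [(PySem.List.pyGet? lines (i : Int)).getD ""])
  else (i, chunk)
termination_by n - i
decreasing_by omega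

-- the inner while never moves the index backwards (needed for the outer loop's termination)
theorem pvInnerB_ge (lines : List String) (n k : Nat) :
    ∀ i chunk, i ≤ (pvInnerB lines n k i chunk).1 := by
  intro i
  induction hm : n - i using Nat.strong_induction_on generalizing i with
  | _ m ih =>
  intro chunk
  rw [pvInnerB]
  split
  · next h =>
    exact le_trans (Nat.le_succ i) (ih (n - (i+1)) (by omega) (i+1) rfl _)
  · exact Nat.le_refl i

-- outer while: 'while i < n: line = lines[i]; i += 1; if line == "": continue; …'
def pvOuterB (lines : List String) (n k : Nat) (i : Nat) (slides : List (List String)) : List (List String) :=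
  if _h : i < n then
    let line := (PySem.List.pyGet? lines (i : Int)).getD ""
    if line = "" then pvOuterB lines n k (i + 1) slides
    else
      let r := pvInnerB lines n k (i + 1) [line]
      pvOuterB lines n k r.1 (slides ++ [r.2])
  else slides
termination_by n - i
decreasing_by
  · omega
  · have := pvInnerB_ge lines n k (i + 1) [(PySem.List.pyGet? lines (i : Int)).getD ""]
    omega

def split_slides_by_line_count_alt (text : String) (lines_per_slide : Int) : List (List String) :=
  let k : Nat := (if lines_per_slide ≥ 1 then lines_per_slide else 1).toNat
  let lines := (PySem.Str.splitlines text).map PySem.Str.strip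
  pvOuterB lines lines.length k 0 []

-- ===== PRECONDITION & SPEC =====
def Spec_split_slides_by_line_count (text : String) (lines_per_slide : Int) (out : List (List String)) : Prop := out = split_slides_by_line_count_alt text lines_per_slide
instance (text : String) (lines_per_slide : Int) (out : List (List String)) : Decidable (Spec_split_slides_by_line_count text lines_per_slide out) := by unfold Spec_split_slides_by_line_count; infer_instance

-- ===== CLAIM (what is proved, stated in full; the proofs are below) =====
def Claim_equal_split_slides_by_line_count : Prop := ∀ (text : String) (lines_per_slide : Int), Dom_split_slides_by_line_count text lines_per_slide → Spec_split_slides_by_line_count text lines_per_slide (split_slides_by_line_count text lines_per_slide)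

-- ===== LEMMAS AND PROOFS =====

-- chunks of size m+1 of a verse
def pvChunks (m : Nat) : List String → List (List String)
  | [] => []
  | x :: xs => ((x :: xs).take (m+1)) :: pvChunks m ((x :: xs).drop (m+1))
termination_by v => v.length
decreasing_by simp

-- the verse structure of a (stripped) line list: maximal non-blank runs, cur = open verse
def pvVerses : List String → List String → List (List String)
  | cur, [] => if cur ≠ [] then [cur] else []
  | cur, l :: rest =>
    if l = "" then (if cur ≠ [] then cur :: pvVerses [] rest else pvVerses [] rest)
    else pvVerses (cur ++ [l]) rest

theorem pvChunks_eq (m : Nat) (v : List String) (hv : v ≠ []) :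
    pvChunks m v = v.take (m+1) :: pvChunks m (v.drop (m+1)) := by
  cases v with
  | nil => exact absurd rfl hv
  | cons x xs => conv_lhs => rw [pvChunks]

theorem pvCount_eq (n K : Nat) (hK : 0 < K) :
    (if (0:Int) < (n:Int) then (((n:Int) - 0 + (K:Int) - 1) / (K:Int)).toNat else 0) = (n + K - 1)/K := by
  rcases Nat.eq_zero_or_pos n with h | h
  · subst h; simp [Nat.div_eq_of_lt (by omega : K - 1 < K)]
  · rw [if_pos (by exact_mod_cast h)]
    have : ((n:Int) - 0 + (K:Int) - 1) = ((n + K - 1 : Nat) : Int) := by omega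
    rw [this, ← Int.natCast_ediv, Int.toNat_natCast]

theorem pvMapChunks (K : Nat) (hK : 0 < K) : ∀ (v : List String),
    (List.range ((v.length + K - 1)/K)).map (fun j => (v.drop (K*j)).take K) = pvChunks (K-1) v := by
  intro v
  induction hn : v.length using Nat.strong_induction_on generalizing v with
  | _ n ih =>
  cases v with
  | nil =>
    simp only [List.length_nil] at hn
    subst hn
    simp [Nat.div_eq_of_lt (by omega : K - 1 < K), pvChunks]
  | cons x xs =>
    subst hn
    set w := x :: xs with hw
    have hvne : w ≠ [] := by simp [hw]
    have hn1 : 0 < w.length := by simp [hw]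
    have hcnt : (w.length + K - 1)/K = ((w.drop K).length + K - 1)/K + 1 := by
      have hd : (w.drop K).length = w.length - K := by simp
      rw [hd]
      rcases Nat.lt_or_ge w.length K with hlt | hle
      case inr =>
        have : w.length - K + K - 1 = w.length - 1 := by omega
        rw [this]
        have : w.length + K - 1 = (w.length - 1) + K := by omega
        rw [this, Nat.add_div_right _ hK]
      case inl =>
        have h1 : w.length - K = 0 := by omega
        rw [h1]
        have h2 : (K - 1)/K = 0 := Nat.div_eq_of_lt (by omega)
        have h3 : (w.length + K - 1)/K = 1 := by
          apply Nat.div_eq_of_lt_le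
          · omega
          · omega
        simp [h2, h3]
    rw [hcnt, List.range_succ_eq_map, List.map_cons, List.map_map]
    have hfront : (w.drop (K*0)).take K = w.take K := by simp
    have htail : ((List.range (((w.drop K).length + K - 1)/K)).map
        ((fun j => (w.drop (K*j)).take K) ∘ Nat.succ))
        = (List.range (((w.drop K).length + K - 1)/K)).map (fun j => ((w.drop K).drop (K*j)).take K) := by
      apply List.map_congr_left
      intro j _
      show (w.drop (K * Nat.succ j)).take K = ((w.drop K).drop (K*j)).take K
      rw [List.drop_drop, Nat.mul_succ, Nat.add_comm (K*j) K]
    rw [hfront, htail, ih (w.drop K).length (by rw [List.length_drop]; exact Nat.sub_lt hn1 hK) _ rfl]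
    rw [pvChunks_eq (K-1) w hvne, Nat.sub_add_cancel hK]

theorem pvChunkLoop (K : Nat) (hK : 0 < K) (v : List String) (acc : List (List String)) :
    (PySem.List.pyRange 0 (PySem.List.len v) (K : Int)).foldl (fun acc i =>
      let chunk := PySem.List.slice v (some i) (some (i + (K : Int)))
      if chunk ≠ [] then acc ++ [chunk] else acc) acc
    = acc ++ pvChunks (K - 1) v := by
  rw [PySem.List.len_eq, PySem.List.pyRange_of_pos 0 (v.length : Int) (by exact_mod_cast hK)]
  have hc : (if (0:Int) < (v.length:Int) then (((v.length:Int) - 0 + (K:Int) - 1) / (K:Int)).toNat else 0)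
      = (v.length + K - 1)/K := pvCount_eq v.length K hK
  rw [hc, List.foldl_map]
  rw [PySem.List.foldl_congr_mem _ _ (fun acc j => acc ++ [(v.drop (K*j)).take K]) acc ?_]
  · rw [PySem.List.foldl_append_singleton_eq_map, pvMapChunks K hK v]
  · intro a j hj
    rw [List.mem_range] at hj
    have hjn : K * j < v.length := by
      have h1 : j + 1 ≤ (v.length + K - 1)/K := hj
      rw [Nat.le_div_iff_mul_le hK, Nat.succ_mul, Nat.mul_comm j K] at h1
      omega
    have hcast : (0:Int) + (K:Int) * (j:Int) = ((K*j : Nat) : Int) := by push_cast; ring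
    simp only [hcast]
    rw [PySem.List.slice_natCast_add]
    have hne : (v.drop (K*j)).take K ≠ [] := by
      simp only [ne_eq, List.take_eq_nil_iff, List.drop_eq_nil_iff]
      omega
    simp [hne]

-- A's verse-building fold computes pvVerses of the stripped lines
theorem pvFoldVerses : ∀ (raws : List String) (verses : List (List String)) (cur : List String),
    (let st := raws.foldl
      (fun (st : List (List String) × List String) raw_line =>
        let line := PySem.Str.strip raw_line
        if line = "" then
          (if st.2 ≠ [] then (st.1 ++ [st.2], []) else st)
        else
          (st.1, st.2 ++ [line])) (verses, cur)
     if st.2 ≠ [] then st.1 ++ [st.2] else st.1)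
    = verses ++ pvVerses cur (raws.map PySem.Str.strip) := by
  intro raws
  induction raws with
  | nil =>
    intro verses cur
    simp only [List.foldl_nil, List.map_nil, pvVerses]
    by_cases h : cur = [] <;> simp [h]
  | cons r raws ih =>
    intro verses cur
    simp only [List.foldl_cons, List.map_cons, pvVerses]
    by_cases hb : PySem.Str.strip r = ""
    · simp only [hb, if_pos]
      by_cases hc : cur = []
      · simp only [hc, ne_eq, not_true_eq_false, if_false, ite_not]
        simpa [hc] using ih verses []
      · simp only [ne_eq, hc, not_false_eq_true, if_true]
        rw [ih (verses ++ [cur]) []]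
        simp
    · simp only [hb, if_false]
      exact ih verses (cur ++ [PySem.Str.strip r])

-- pvVerses with a non-empty open verse: close it with the leading non-blank run
theorem pvVerses_run : ∀ (rest cur : List String), cur ≠ [] →
    pvVerses cur rest = (cur ++ rest.takeWhile (· ≠ "")) :: pvVerses [] (rest.dropWhile (· ≠ "")) := by
  intro rest
  induction rest with
  | nil => intro cur hc; simp [pvVerses, hc]
  | cons r rest ih =>
    intro cur hc
    by_cases hb : r = ""
    · simp [pvVerses, hb, hc, List.takeWhile, List.dropWhile, pvVerses]
    · simp only [pvVerses, hb, if_false,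
        List.takeWhile_cons, List.dropWhile_cons]
      rw [ih (cur ++ [r]) (by simp)]
      simp [hb]

-- a non-blank block followed by a blank-headed remainder splits off as one verse
theorem pvVerses_prefix (d rem : List String) (hd : ∀ x ∈ d, x ≠ "")
    (hrem : rem = [] ∨ ∃ t, rem = "" :: t) :
    pvVerses [] (d ++ rem) = (if d = [] then [] else [d]) ++ pvVerses [] rem := by
  cases d with
  | nil => simp
  | cons a d' =>
    have ha : a ≠ "" := hd a (by simp)
    simp only [List.cons_append, pvVerses, ha, if_false, List.nil_append]
    rw [pvVerses_run (d' ++ rem) [a] (by simp)]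
    have h1 : d'.takeWhile (· ≠ "") = d' :=
      List.takeWhile_eq_self_iff.mpr (fun x hx => by simpa using hd x (by simp [hx]))
    have h2 : d'.dropWhile (· ≠ "") = [] :=
      List.dropWhile_eq_nil_iff.mpr (fun x hx => by simpa using hd x (by simp [hx]))
    have htw : (d' ++ rem).takeWhile (· ≠ "") = d' := by
      rw [List.takeWhile_append, h1, if_pos rfl]
      rcases hrem with h | ⟨t, h⟩ <;> simp [h]
    have hdw : (d' ++ rem).dropWhile (· ≠ "") = rem := by
      rw [List.dropWhile_append, h2]
      rcases hrem with h | ⟨t, h⟩ <;> simp [h]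
    rw [htw, hdw]
    simp

-- the dropWhile remainder is [] or starts with a blank
theorem pvDropWhile_shape (l : List String) :
    l.dropWhile (· ≠ "") = [] ∨ ∃ t, l.dropWhile (· ≠ "") = "" :: t := by
  induction l with
  | nil => left; rfl
  | cons a l ih =>
    by_cases h : a = ""
    · right; exact ⟨l, by simp [h]⟩
    · simpa [h] using ih

-- characterization of B's inner while
theorem pvInnerB_eq (lines : List String) (K : Nat) :
    ∀ i chunk, pvInnerB lines lines.length K i chunk =
      (i + (((lines.drop i).takeWhile (· ≠ "")).take (K - chunk.length)).length,
       chunk ++ ((lines.drop i).takeWhile (· ≠ "")).take (K - chunk.length)) := by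
  intro i chunk
  fun_induction pvInnerB lines lines.length K i chunk with
  | case1 i chunk h ih =>
    obtain ⟨hin, hne, hlt⟩ := h
    have hget : (PySem.List.pyGet? lines (i : Int)).getD "" = lines[i]'hin := by
      simp [PySem.List.pyGet?_natCast, List.getElem?_eq_getElem hin]
    have hdrop : lines.drop i = lines[i]'hin :: lines.drop (i+1) :=
      (List.drop_eq_getElem_cons hin)
    rw [ih]
    rw [hget] at hne
    have hK : K - chunk.length = (K - (chunk.length + 1)) + 1 := by omega
    rw [hdrop, List.takeWhile_cons, if_pos (by simpa using hne), hK, List.take_succ_cons]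
    simp only [Prod.mk.injEq]
    refine ⟨by simp; omega, by simp [List.getElem?_eq_getElem hin]⟩
  | case2 i chunk h =>
    rw [not_and, not_and] at h
    simp only [not_lt, ne_eq] at h
    by_cases hin : i < lines.length
    · by_cases hbl : (PySem.List.pyGet? lines (i : Int)).getD "" = ""
      · have hget : (PySem.List.pyGet? lines (i : Int)).getD "" = lines[i]'hin := by
          simp [PySem.List.pyGet?_natCast, List.getElem?_eq_getElem hin]
        have hdrop : lines.drop i = lines[i]'hin :: lines.drop (i+1) :=
          (List.drop_eq_getElem_cons hin)
        have hbl' : lines[i]'hin = "" := hget.symm.trans hbl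
        rw [hdrop, List.takeWhile_cons, if_neg (by simp [hbl'])]
        simp
      · have : K ≤ chunk.length := h hin hbl
        simp [Nat.sub_eq_zero_of_le this]
    · rw [List.drop_eq_nil_of_le (by omega)]
      simp

-- characterization of B's outer while in terms of pvVerses and pvChunks
theorem pvOuterB_eq (lines : List String) (K : Nat) (hK : 0 < K) :
    ∀ i slides, pvOuterB lines lines.length K i slides
      = slides ++ (pvVerses [] (lines.drop i)).flatMap (pvChunks (K-1)) := by
  intro i
  induction hm : lines.length - i using Nat.strong_induction_on generalizing i with
  | _ m ih =>
  intro slides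
  by_cases hin : i < lines.length
  · have hget : (PySem.List.pyGet? lines (i : Int)).getD "" = lines[i]'hin := by
      simp [PySem.List.pyGet?_natCast, List.getElem?_eq_getElem hin]
    have hdrop : lines.drop i = lines[i]'hin :: lines.drop (i+1) :=
      (List.drop_eq_getElem_cons hin)
    rw [pvOuterB, dif_pos hin]
    by_cases hbl : (PySem.List.pyGet? lines (i : Int)).getD "" = ""
    · simp only [hbl, if_pos]
      rw [ih (lines.length - (i+1)) (by omega) (i+1) rfl slides]
      rw [hdrop, pvVerses]
      rw [hget] at hbl
      simp [hbl]
    · simp only [hbl, if_false]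
      rw [pvInnerB_eq]
      set run := (lines.drop (i+1)).takeWhile (· ≠ "") with hrun
      set rem := (lines.drop (i+1)).dropWhile (· ≠ "") with hrem
      set line := (PySem.List.pyGet? lines (i : Int)).getD "" with hline
      have hKm : K - ([line].length) = K - 1 := by simp
      simp only [hKm]
      set c := run.take (K-1) with hc
      have hsplit : lines.drop (i+1) = run ++ rem := (List.takeWhile_append_dropWhile).symm
      have hlen1 : (lines.drop (i+1)).length = run.length + rem.length := by
        rw [hsplit, List.length_append]
      have hclen : c.length ≤ run.length := by rw [hc, List.length_take]; omega
      have hi' : i + 1 + c.length ≤ lines.length := by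
        have h3 : (lines.drop (i+1)).length = lines.length - (i+1) := by simp
        omega
      rw [ih (lines.length - (i + 1 + c.length)) (by omega) _ rfl]
      -- remaining suffix from the new index
      have hdrop' : lines.drop (i + 1 + c.length) = run.drop (K-1) ++ rem := by
        have hdd : lines.drop (i + 1 + c.length) = (lines.drop (i+1)).drop c.length := by
          rw [List.drop_drop]
        rw [hdd, hsplit, List.drop_append_of_le_length hclen]
        have hdr : List.drop c.length run = List.drop (K-1) run := by
          rcases Nat.le_total (K-1) run.length with hle | hle
          · have hcl : c.length = K - 1 := by rw [hc, List.length_take]; omega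
            rw [hcl]
          · have hcl : c.length = run.length := by rw [hc, List.length_take]; omega
            rw [hcl, List.drop_length, List.drop_eq_nil_of_le hle]
        rw [hdr]
      rw [hdrop', pvVerses_prefix (run.drop (K-1)) rem
        (by intro x hx
            have : x ∈ run := List.mem_of_mem_drop hx
            have := List.mem_takeWhile_imp (hrun ▸ this)
            simpa using this)
        (hrem ▸ pvDropWhile_shape (lines.drop (i+1)))]
      -- A side: the verse at i is line :: run
      rw [hdrop, pvVerses, ← hget, if_neg hbl, List.nil_append,
        pvVerses_run (lines.drop (i+1)) [line] (by simp), ← hrun, ← hrem]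
      rw [List.flatMap_cons]
      simp only [List.singleton_append]
      rw [pvChunks_eq (K-1) (line :: run) (by simp), Nat.sub_add_cancel hK]
      have htake : (line :: run).take K = line :: c := by
        cases K with
        | zero => omega
        | succ K' => simp [hc, List.take_succ_cons]
      have hdropC : (line :: run).drop K = run.drop (K-1) := by
        cases K with
        | zero => omega
        | succ K' => simp [List.drop_succ_cons]
      rw [htake, hdropC]
      by_cases hrd : run.drop (K-1) = []
      · simp [hrd, pvChunks, List.append_assoc]
      · rw [List.flatMap_append, if_neg hrd, List.flatMap_cons]
        have : pvChunks (K-1) (run.drop (K-1)) =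
            (run.drop (K-1)).take K :: pvChunks (K-1) ((run.drop (K-1)).drop K) := by
          rw [pvChunks_eq (K-1) _ hrd, Nat.sub_add_cancel hK]
        simp [List.append_assoc]
  · rw [pvOuterB, dif_neg hin, List.drop_eq_nil_of_le (by omega)]
    simp [pvVerses]

-- main bridge: A's two-phase computation equals B's scan
theorem pvMain (text : String) (lps : Int) :
    split_slides_by_line_count text lps = split_slides_by_line_count_alt text lps := by
  unfold split_slides_by_line_count split_slides_by_line_count_alt
  dsimp only
  rw [pvFoldVerses (PySem.Str.splitlines text) [] [], List.nil_append]
  have hkK : (if lps < 1 then (1:Int) else lps)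
      = (((if lps ≥ 1 then lps else 1).toNat : Nat) : Int) := by
    split_ifs <;> omega
  rw [hkK]
  set K : Nat := (if lps ≥ 1 then lps else 1).toNat with hK
  have hKpos : 0 < K := by rw [hK]; split <;> omega
  rw [PySem.List.foldl_congr_mem _ _ (fun acc v => acc ++ pvChunks (K-1) v) []
    (fun acc v _ => by simpa using pvChunkLoop K hKpos v acc)]
  rw [PySem.List.foldl_append_eq_flatMap, List.nil_append]
  rw [pvOuterB_eq (List.map PySem.Str.strip (PySem.Str.splitlines text)) K hKpos 0 [],
    List.drop_zero, List.nil_append]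

-- ===== VERDICT (by name: the statement is the Claim_ definition above) =====
theorem split_slides_by_line_count_spec : Claim_equal_split_slides_by_line_count := by
  intro text lps _
  unfold Spec_split_slides_by_line_count
  exact pvMain text lps
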